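-- pv_equiv track=rewrite | github.com/jankralx/tt04-fm-transmitter | python/USB_board/main.py | decode_spi_config
-- ===== SOURCE A (Python) =====
-- BIT_POSITIONS = {
--     'ACC_INC': (0, 17),
--     'DF_INC_COEF': (18, 21),
--     'DF_INC_FACT': (22, 23),
--     'DAC_ENA': (24, 27),
--     'DITH_FACT': (28, 30),
--     'MULTIPLY_SEL': (31, 31),
--     'AUDIO_CHAN_SEL': (32, 32),
--     'I2S_WS_ALIGN': (33, 33),
--     'SPI_OVERRIDE': (34, 34)
-- }
--
-- def decode_spi_config(byte_array):
--     # Convert byte array to integer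
--     spi_latch = 0
--     for b in byte_array:
--         spi_latch = (spi_latch << 8) | b
--
--     # bit shift by 4 bits to get the actual value
--     spi_latch >>= 4
--
--     decoded_values = {}
--
--     #
--     # Extract and decode each value from the spi_latch register
--     for key, (lsb, msb) in BIT_POSITIONS.items():
--         mask = (1 << (msb - lsb + 1)) - 1
--         decoded_values[key] = (spi_latch >> lsb) & mask
--     #
--     return decoded_values
-- ===== SOURCE B (Python) =====
-- # B: single running register consumed field-by-field in layout order (widths),
-- # instead of absolute lsb/msb extraction per field.
-- FIELD_WIDTHS = [
--     ('ACC_INC', 18),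
--     ('DF_INC_COEF', 4),
--     ('DF_INC_FACT', 2),
--     ('DAC_ENA', 4),
--     ('DITH_FACT', 3),
--     ('MULTIPLY_SEL', 1),
--     ('AUDIO_CHAN_SEL', 1),
--     ('I2S_WS_ALIGN', 1),
--     ('SPI_OVERRIDE', 1),
-- ]
--
-- def decode_spi_config(byte_array):
--     spi = 0
--     for b in byte_array:
--         spi = spi << 8 | b
--     spi >>= 4
--     decoded = {}
--     for key, width in FIELD_WIDTHS:
--         decoded[key] = spi & ((1 << width) - 1)
--         spi >>= width
--     return decoded
-- ===== Notes on version B (the rewrite author's own statement) =====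
-- stated objective: alternative
-- what changed: B replaces the absolute lsb/msb bit-position table and per-field shift-by-lsb extraction with an ordered width table and a shift-and-consume pass over a single running register (mask off the low width bits, then shift them out).
import Mathlib
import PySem

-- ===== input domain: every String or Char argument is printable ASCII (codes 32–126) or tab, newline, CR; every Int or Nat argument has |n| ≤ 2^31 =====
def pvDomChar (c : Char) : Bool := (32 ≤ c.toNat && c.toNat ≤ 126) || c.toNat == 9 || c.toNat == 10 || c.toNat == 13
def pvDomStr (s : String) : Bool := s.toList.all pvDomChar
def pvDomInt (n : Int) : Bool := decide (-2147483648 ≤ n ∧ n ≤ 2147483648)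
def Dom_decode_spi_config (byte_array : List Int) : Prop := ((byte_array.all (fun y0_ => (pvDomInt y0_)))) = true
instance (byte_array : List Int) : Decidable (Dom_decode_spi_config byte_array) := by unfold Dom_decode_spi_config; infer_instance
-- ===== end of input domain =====

-- B re-decodes the fields by consuming a running register width-by-width in layout order
-- instead of A's absolute lsb/msb extraction; same cost, alternative decomposition.

-- ===== PORT A =====
-- BIT_POSITIONS dict: association list (key, (lsb, msb)), insertion order.
def BIT_POSITIONS : List (String × Int × Int) :=
  [("ACC_INC", (0, 17)), ("DF_INC_COEF", (18, 21)), ("DF_INC_FACT", (22, 23)),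
   ("DAC_ENA", (24, 27)), ("DITH_FACT", (28, 30)), ("MULTIPLY_SEL", (31, 31)),
   ("AUDIO_CHAN_SEL", (32, 32)), ("I2S_WS_ALIGN", (33, 33)), ("SPI_OVERRIDE", (34, 34))]

-- Shift amounts lsb and msb-lsb+1 are nonnegative table constants, so .toNat is exact.
def decode_spi_config (byte_array : List Int) : List (String × Int) :=
  let spi_latch : Int := byte_array.foldl (fun acc b => PySem.Int.bor (acc <<< (8 : Nat)) b) 0
  let spi_latch := spi_latch >>> (4 : Nat)
  (BIT_POSITIONS.foldl
    (fun (d : PySem.Dict String Int) p =>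
      let mask : Int := (1 <<< (p.2.2 - p.2.1 + 1).toNat) - 1
      d.insert p.1 (PySem.Int.band (spi_latch >>> p.2.1.toNat) mask))
    PySem.Dict.empty).items

-- ===== PORT B =====
-- FIELD_WIDTHS: (key, width) in layout order; widths are nonnegative constants, kept as Nat for the shifts.
def FIELD_WIDTHS : List (String × Nat) :=
  [("ACC_INC", 18), ("DF_INC_COEF", 4), ("DF_INC_FACT", 2), ("DAC_ENA", 4),
   ("DITH_FACT", 3), ("MULTIPLY_SEL", 1), ("AUDIO_CHAN_SEL", 1),
   ("I2S_WS_ALIGN", 1), ("SPI_OVERRIDE", 1)]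

def decode_spi_config_alt (byte_array : List Int) : List (String × Int) :=
  let spi : Int := byte_array.foldl (fun acc b => PySem.Int.bor (acc <<< (8 : Nat)) b) 0
  let st := FIELD_WIDTHS.foldl
    (fun (st : Int × PySem.Dict String Int) p =>
      (st.1 >>> p.2, st.2.insert p.1 (PySem.Int.band st.1 ((1 <<< p.2) - 1))))
    (spi >>> (4 : Nat), PySem.Dict.empty)
  st.2.items

-- ===== PRECONDITION & SPEC =====
def Spec_decode_spi_config (byte_array : List Int) (out : List (String × Int)) : Prop := out = decode_spi_config_alt byte_array
instance (byte_array : List Int) (out : List (String × Int)) : Decidable (Spec_decode_spi_config byte_array out) := by unfold Spec_decode_spi_config; infer_instance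

-- ===== CLAIM (what is proved, stated in full; the proofs are below) =====
def Claim_equal_decode_spi_config : Prop := ∀ (byte_array : List Int), Dom_decode_spi_config byte_array → Spec_decode_spi_config byte_array (decode_spi_config byte_array)

-- ===== LEMMAS AND PROOFS =====

-- Both ports build the same shift-and-OR register; with it abstracted as s, the two
-- field loops produce identical insert chains: B's consumed register after k fields is
-- s >>> (sum of the first k widths) = s >>> lsb_k (Int.shiftRight_add), the fields being contiguous.
theorem decode_spi_extract_eq (s : Int) :
    ((BIT_POSITIONS.foldl
      (fun (d : PySem.Dict String Int) p =>
        let mask : Int := (1 <<< (p.2.2 - p.2.1 + 1).toNat) - 1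
        d.insert p.1 (PySem.Int.band (s >>> p.2.1.toNat) mask))
      PySem.Dict.empty).items)
    = (FIELD_WIDTHS.foldl
        (fun (st : Int × PySem.Dict String Int) p =>
          (st.1 >>> p.2, st.2.insert p.1 (PySem.Int.band st.1 ((1 <<< p.2) - 1))))
        (s, PySem.Dict.empty)).2.items := by
  have h : ∀ (a b : Nat), s >>> a >>> b = s >>> (a + b) :=
    fun a b => (Int.shiftRight_add s a b).symm
  simp only [BIT_POSITIONS, FIELD_WIDTHS, List.foldl, Int.shiftRight_natCast_right]
  simp only [h]
  simp

-- ===== VERDICT (by name: the statement is the Claim_ definition above) =====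
theorem decode_spi_config_spec : Claim_equal_decode_spi_config := by
  intro byte_array _
  unfold Spec_decode_spi_config decode_spi_config decode_spi_config_alt
  exact decode_spi_extract_eq _
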